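-- pv_equiv track=rewrite | github.com/stan96D/ecommerce | ecommerce_website/classes/helpers/progress_view.py | get_return_progress_phases
-- ===== SOURCE A (Python) =====
-- def get_return_progress_phases(current_status=None):
--     # Define the phases
--     phases = [
--         {'name': 'Openstaand', 'status': 'open'},
--         {'name': 'Betaald', 'status': 'paid'},
--         {'name': 'Wachtende op bezorgservice', 'status': 'partly'},
--         {'name': 'Opgehaald', 'status': 'delivered'},
--         {'name': 'Afgerond', 'status': 'done'}
--
--     ]
--
--     if current_status:
--         status_found = False  # Track if the current status is found
--
--         for i, phase in enumerate(phases):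
--             if phase['status'] == current_status:
--                 if current_status == 'done':
--                     # If it's 'delivered', mark it as completed
--                     phase['status'] = 'completed'
--                 elif current_status in ['open', 'failed'] and i == 0:
--                     # If it's the first phase and is 'open' or 'failed', make it current
--                     phase['status'] = 'current'
--                 else:
--                     # Mark this phase as the current phase
--                     phase['status'] = 'current'
--                 status_found = True
--             elif status_found:
--                 # Mark all subsequent phases as 'upcoming'
--                 phase['status'] = 'upcoming'
--             else:
--                 # Mark all previous phases as 'completed'
--                 phase['status'] = 'completed'
--     else:
--         # Default logic if `current_status` is not provided
--         for i, phase in enumerate(phases):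
--             if i == 0:
--                 phase['status'] = 'current'
--             else:
--                 phase['status'] = 'upcoming'
--
--     return phases
-- ===== SOURCE B (Python) =====
-- def get_return_progress_phases(current_status=None):
--     names = ['Openstaand', 'Betaald', 'Wachtende op bezorgservice', 'Opgehaald', 'Afgerond']
--     statuses = ['open', 'paid', 'partly', 'delivered', 'done']
--     if not current_status:
--         labels = ['current'] + ['upcoming'] * 4
--     elif current_status not in statuses:
--         labels = ['completed'] * 5
--     else:
--         idx = statuses.index(current_status)
--         pivot = 'completed' if current_status == 'done' else 'current'
--         labels = ['completed'] * idx + [pivot] + ['upcoming'] * (4 - idx)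
--     return [{'name': n, 'status': l} for n, l in zip(names, labels)]
-- ===== Notes on version B (the rewrite author's own statement) =====
-- stated objective: simpler
-- what changed: Replaces the stateful flag-tracking mutation loop with a precomputed pivot index from which the label list is built by replication and then zipped with the names.
import Mathlib
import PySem

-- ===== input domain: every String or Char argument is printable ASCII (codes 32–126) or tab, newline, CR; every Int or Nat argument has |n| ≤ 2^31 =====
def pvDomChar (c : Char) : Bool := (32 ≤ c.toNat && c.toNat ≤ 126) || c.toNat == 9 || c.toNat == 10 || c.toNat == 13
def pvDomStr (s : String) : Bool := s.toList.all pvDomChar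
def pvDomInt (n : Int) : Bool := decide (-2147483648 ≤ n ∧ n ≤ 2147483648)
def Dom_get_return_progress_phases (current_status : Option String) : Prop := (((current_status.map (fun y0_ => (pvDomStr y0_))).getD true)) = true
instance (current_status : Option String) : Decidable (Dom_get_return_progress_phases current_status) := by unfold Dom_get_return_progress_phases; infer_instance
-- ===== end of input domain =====

-- B replaces A's stateful flag-tracking mutation loop by a precomputed pivot index
-- from which the label list is built by replication and zipped with the names (objective: simpler).


-- ===== PORT A =====
-- the literal phases list (dicts as association lists in insertion order)
def pvPhases0 : List (PySem.Dict String String) :=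
  [ ⟨[("name", "Openstaand"), ("status", "open")]⟩,
    ⟨[("name", "Betaald"), ("status", "paid")]⟩,
    ⟨[("name", "Wachtende op bezorgservice"), ("status", "partly")]⟩,
    ⟨[("name", "Opgehaald"), ("status", "delivered")]⟩,
    ⟨[("name", "Afgerond"), ("status", "done")]⟩ ]

-- A's main loop: index i, remaining phases, status_found flag.
-- phase['status'] is read with Dict.getD (the key is present in every literal phase,
-- so this is exact); phase['status'] = x is Dict.insert (overwrite in place).
def pvLoopA (cs : String) : Int → List (PySem.Dict String String) → Bool → List (PySem.Dict String String)
  | _, [], _ => []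
  | i, p :: rest, found =>
    if PySem.Dict.getD p "status" "" == cs then
      (if cs == "done" then PySem.Dict.insert p "status" "completed"
       else if (cs == "open" || cs == "failed") && i == 0 then PySem.Dict.insert p "status" "current"
       else PySem.Dict.insert p "status" "current") :: pvLoopA cs (i + 1) rest true
    else if found then
      PySem.Dict.insert p "status" "upcoming" :: pvLoopA cs (i + 1) rest found
    else
      PySem.Dict.insert p "status" "completed" :: pvLoopA cs (i + 1) rest found

-- A's default loop (current_status falsy)
def pvLoopDefault : Int → List (PySem.Dict String String) → List (PySem.Dict String String)
  | _, [] => []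
  | i, p :: rest =>
    (if i == 0 then PySem.Dict.insert p "status" "current"
     else PySem.Dict.insert p "status" "upcoming") :: pvLoopDefault (i + 1) rest

def get_return_progress_phases (current_status : Option String) : List (List (String × String)) :=
  -- dicts are returned as their item lists (type convention)
  let phases : List (PySem.Dict String String) :=
    match current_status with
    | some s => if s == "" then pvLoopDefault 0 pvPhases0 else pvLoopA s 0 pvPhases0 false
    | none => pvLoopDefault 0 pvPhases0
  phases.map (fun d => d.items)

-- ===== PORT B =====
def pvNames : List String :=
  ["Openstaand", "Betaald", "Wachtende op bezorgservice", "Opgehaald", "Afgerond"]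

def pvStatuses : List String := ["open", "paid", "partly", "delivered", "done"]

def get_return_progress_phases_alt (current_status : Option String) : List (List (String × String)) :=
  let labels : List String :=
    match current_status with
    | none => "current" :: List.replicate 4 "upcoming"
    | some s =>
      if s == "" then "current" :: List.replicate 4 "upcoming"
      else
        match PySem.List.index? pvStatuses s with
        | none => List.replicate 5 "completed"
        | some idx =>
          List.replicate idx "completed"
            ++ [if s == "done" then "completed" else "current"]
            ++ List.replicate (4 - idx) "upcoming"
  (pvNames.zip labels).map (fun nl => [("name", nl.1), ("status", nl.2)])

-- ===== PRECONDITION & SPEC =====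
def Spec_get_return_progress_phases (current_status : Option String) (out : List (List (String × String))) : Prop := out = get_return_progress_phases_alt current_status
instance (current_status : Option String) (out : List (List (String × String))) : Decidable (Spec_get_return_progress_phases current_status out) := by unfold Spec_get_return_progress_phases; infer_instance

-- ===== CLAIM =====
def Claim_equal_get_return_progress_phases : Prop := ∀ (current_status : Option String), Dom_get_return_progress_phases current_status → Spec_get_return_progress_phases current_status (get_return_progress_phases current_status)

-- ===== LEMMAS AND PROOFS =====

-- ===== VERDICT =====
theorem get_return_progress_phases_spec : Claim_equal_get_return_progress_phases := by
  intro cs _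
  unfold Spec_get_return_progress_phases
  match cs with
  | none => decide
  | some s =>
    by_cases h0 : s = ""; · subst h0; decide
    by_cases h1 : s = "open"; · subst h1; decide
    by_cases h2 : s = "paid"; · subst h2; decide
    by_cases h3 : s = "partly"; · subst h3; decide
    by_cases h4 : s = "delivered"; · subst h4; decide
    by_cases h5 : s = "done"; · subst h5; decide
    have hidx : List.idxOf? s ["open", "paid", "partly", "delivered", "done"] = none := by
      simp [List.idxOf?_eq_none_iff, h1, h2, h3, h4, h5]
    simp [get_return_progress_phases, get_return_progress_phases_alt, pvLoopA, pvPhases0,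
      pvStatuses, pvNames, hidx, PySem.Dict.getD, PySem.Dict.get?, PySem.Dict.insert,
      h0, Ne.symm h1, Ne.symm h2, Ne.symm h3, Ne.symm h4, Ne.symm h5]
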